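-- pv_equiv track=rewrite | github.com/thomkuo/CS313E | Test2/SpellingTest.py | spelling_test_helper
-- ===== SOURCE A (Python) =====
-- def spelling_test_helper(s, l, compare):
--     #base case
--     if compare == s:
--         return True
--     else:
--         for i in l:
--             alternate = compare + i
--             if alternate == s[0:len(alternate)]:
--                 l.remove(i)
--                 return spelling_test_helper(s, l, alternate)
-- ===== SOURCE B (Python) =====
-- # Position-based rewrite: instead of rebuilding 'compare'-prefixed strings and
-- # comparing against growing slices of s, track an index pos into s and match each
-- # piece directly at pos; deletes the matched piece by index. Mutates l like A does.
-- def spelling_test_helper(s, l, compare):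
--     if s[0:len(compare)] != compare:
--         return None
--     pos = len(compare)
--     while pos != len(s):
--         for k, piece in enumerate(l):
--             if s[pos:pos + len(piece)] == piece:
--                 del l[k]
--                 pos += len(piece)
--                 break
--         else:
--             return None
--     return True
-- ===== Notes on version B (the rewrite author's own statement) =====
-- stated objective: alternative
-- what changed: Replaces the tail recursion that rebuilds ever-longer prefix strings (compare+i compared against s[0:len]) with an iterative cursor: a single index pos into s, matching each candidate piece directly at s[pos:pos+len(piece)] and deleting it by index, after one up-front prefix check of compare.
import Mathlib
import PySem

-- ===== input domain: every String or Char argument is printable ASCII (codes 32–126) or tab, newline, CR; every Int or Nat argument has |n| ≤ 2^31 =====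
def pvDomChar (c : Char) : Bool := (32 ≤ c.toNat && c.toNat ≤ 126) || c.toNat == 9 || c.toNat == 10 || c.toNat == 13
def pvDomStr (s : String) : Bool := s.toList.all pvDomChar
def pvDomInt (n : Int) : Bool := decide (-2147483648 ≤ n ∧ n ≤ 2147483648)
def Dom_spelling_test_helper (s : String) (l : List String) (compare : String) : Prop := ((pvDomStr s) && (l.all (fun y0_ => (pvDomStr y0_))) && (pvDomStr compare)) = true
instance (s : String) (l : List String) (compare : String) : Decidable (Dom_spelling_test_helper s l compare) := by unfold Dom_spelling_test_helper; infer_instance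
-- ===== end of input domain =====

-- B replaces A's tail recursion on growing prefix strings by an index cursor into s
-- with direct piece-at-position matching (objective: alternative decomposition).
-- Both Pythons mutate l in place identically; the theorems below are about the return value.

-- ===== PORT A =====
-- termination fact cited by pvRecA's decreasing_by
theorem pv_remove_length {α : Type} [BEq α] [LawfulBEq α] {l l' : List α} {v : α}
    (h : PySem.List.remove? l v = some l') : l'.length < l.length := by
  have hv : v ∈ l := by
    by_contra hv
    rw [(PySem.List.remove?_eq_none_iff l v).mpr hv] at h
    simp at h
  rw [PySem.List.remove?_eq_some_erase l v hv] at h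
  injection h with h
  subst h
  have h1 := List.length_erase_of_mem hv
  have h2 := List.length_pos_of_mem hv
  omega

-- 'for i in l: alternate = compare + i; if alternate == s[0:len(alternate)]: …'
def pvFindA (s comp : List Char) : List String → Option String
  | [] => none
  | i :: t =>
    if comp ++ i.toList = PySem.List.slice s (some 0) (some (((comp ++ i.toList).length : Nat) : Int))
    then some i else pvFindA s comp t

def pvRecA (s : List Char) (l : List String) (comp : List Char) : Option Bool :=
  if comp = s then some true
  else
    match pvFindA s comp l with
    | none => none
    | some i =>
      match h2 : PySem.List.remove? l i with
      | none => none   -- unreachable guard: Python's l.remove(i) succeeds since i ∈ l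
      | some l' => pvRecA s l' (comp ++ i.toList)
termination_by l.length
decreasing_by exact pv_remove_length h2

def spelling_test_helper (s : String) (l : List String) (compare : String) : Option Bool :=
  pvRecA s.toList l compare.toList

-- ===== PORT B =====
-- 'for k, piece in enumerate(l): if s[pos:pos+len(piece)] == piece: del l[k]; …'
def pvScanB (s : List Char) (pos : Nat) : List String → Option (String × List String)
  | [] => none
  | piece :: t =>
    if PySem.List.slice s (some (pos : Int)) (some ((pos + piece.toList.length : Nat) : Int)) = piece.toList
    then some (piece, t)
    else (pvScanB s pos t).map (fun r => (r.1, piece :: r.2))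

-- termination fact cited by pvLoopB's decreasing_by
theorem pvScanB_length (s : List Char) (pos : Nat) :
    ∀ (l : List String) (i : String) (l' : List String),
      pvScanB s pos l = some (i, l') → l'.length < l.length := by
  intro l
  induction l with
  | nil => intro i l' h; simp [pvScanB] at h
  | cons p t ih =>
    intro i l' h
    rw [pvScanB] at h
    split at h
    · simp only [Option.some.injEq, Prod.mk.injEq] at h
      obtain ⟨rfl, rfl⟩ := h
      simp
    · cases ht : pvScanB s pos t with
      | none => rw [ht] at h; simp at h
      | some r =>
        rw [ht] at h
        simp only [Option.map_some, Option.some.injEq, Prod.mk.injEq] at h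
        obtain ⟨-, rfl⟩ := h
        have := ih r.1 r.2 (by rw [ht])
        simp
        omega

-- 'while pos != len(s): … else: return None' / 'return True'
def pvLoopB (s : List Char) (l : List String) (pos : Nat) : Option Bool :=
  if pos = s.length then some true
  else
    match h : pvScanB s pos l with
    | none => none
    | some (piece, l') => pvLoopB s l' (pos + piece.toList.length)
termination_by l.length
decreasing_by exact pvScanB_length s pos l piece l' h

def spelling_test_helper_alt (s : String) (l : List String) (compare : String) : Option Bool :=
  if PySem.List.slice s.toList (some 0) (some ((compare.toList.length : Nat) : Int)) ≠ compare.toList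
  then none
  else pvLoopB s.toList l compare.toList.length

-- ===== PRECONDITION & SPEC =====
def Spec_spelling_test_helper (s : String) (l : List String) (compare : String) (out : Option Bool) : Prop := out = spelling_test_helper_alt s l compare
instance (s : String) (l : List String) (compare : String) (out : Option Bool) : Decidable (Spec_spelling_test_helper s l compare out) := by unfold Spec_spelling_test_helper; infer_instance

-- ===== CLAIM (what is proved, stated in full; the proofs are below) =====
def Claim_equal_spelling_test_helper : Prop := ∀ (s : String) (l : List String) (compare : String), Dom_spelling_test_helper s l compare → Spec_spelling_test_helper s l compare (spelling_test_helper s l compare)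

-- ===== LEMMAS AND PROOFS =====

theorem pv_sliceA (s : List Char) (n : Nat) :
    PySem.List.slice s (some 0) (some ((n : Nat) : Int)) = s.take n := by
  rw [PySem.List.slice_zero_start, PySem.List.slice_to_natCast]

theorem pv_sliceB (s : List Char) (a n : Nat) :
    PySem.List.slice s (some ((a : Nat) : Int)) (some ((a + n : Nat) : Int)) = (s.drop a).take n := by
  rw [PySem.List.slice_natCast]
  simp

-- A's test 'compare+i == s[0:len(compare+i)]' ↔ B's test 's[pos:pos+len(i)] == i', given compare = s[:pos]
theorem pv_cond_iff (s comp : List Char) (i : String) (hp : s.take comp.length = comp) :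
    (comp ++ i.toList = PySem.List.slice s (some 0) (some (((comp ++ i.toList).length : Nat) : Int))) ↔
    (PySem.List.slice s (some ((comp.length : Nat) : Int)) (some ((comp.length + i.toList.length : Nat) : Int)) = i.toList) := by
  rw [pv_sliceA, pv_sliceB, List.length_append, List.take_add, hp]
  constructor
  · intro h; exact (List.append_cancel_left h).symm
  · intro h; rw [h]

theorem pv_findA_none (s comp : List Char) (hp : s.take comp.length ≠ comp) :
    ∀ l : List String, pvFindA s comp l = none := by
  intro l
  induction l with
  | nil => rfl
  | cons i t ih =>
    rw [pvFindA, if_neg, ih]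
    rw [pv_sliceA]
    intro h
    apply hp
    have h2 := congrArg (List.take comp.length) h
    rw [List.take_left, List.take_take, List.length_append,
      Nat.min_eq_left (Nat.le_add_right _ _)] at h2
    exact h2.symm

theorem pv_scan_rel (s comp : List Char) (hp : s.take comp.length = comp) :
    ∀ l : List String,
      (pvFindA s comp l = none ∧ pvScanB s comp.length l = none) ∨
      ∃ i l', pvFindA s comp l = some i ∧ pvScanB s comp.length l = some (i, l') ∧
        PySem.List.remove? l i = some l' ∧
        (s.drop comp.length).take i.toList.length = i.toList := by
  intro l
  induction l with
  | nil => exact Or.inl ⟨rfl, rfl⟩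
  | cons p t ih =>
    by_cases hc : PySem.List.slice s (some ((comp.length : Nat) : Int)) (some ((comp.length + p.toList.length : Nat) : Int)) = p.toList
    · refine Or.inr ⟨p, t, ?_, ?_, ?_, ?_⟩
      · rw [pvFindA, if_pos ((pv_cond_iff s comp p hp).mpr hc)]
      · rw [pvScanB, if_pos hc]
      · exact PySem.List.remove?_cons_self p t
      · rw [pv_sliceB] at hc; exact hc
    · have hcA : ¬ (comp ++ p.toList = PySem.List.slice s (some 0) (some (((comp ++ p.toList).length : Nat) : Int))) :=
        fun h => hc ((pv_cond_iff s comp p hp).mp h)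
      rcases ih with ⟨hfa, hfb⟩ | ⟨i, l', hfa, hfb, hrm, htk⟩
      · refine Or.inl ⟨?_, ?_⟩
        · rw [pvFindA, if_neg hcA]; exact hfa
        · rw [pvScanB, if_neg hc, hfb]; rfl
      · refine Or.inr ⟨i, p :: l', ?_, ?_, ?_, htk⟩
        · rw [pvFindA, if_neg hcA]; exact hfa
        · rw [pvScanB, if_neg hc, hfb]; rfl
        · have hne : p ≠ i := by
            intro h; subst h
            apply hc
            rw [pv_sliceB]; exact htk
          rw [PySem.List.remove?_cons_of_ne t hne, hrm]; rfl

theorem pv_main (s : List Char) :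
    ∀ (n : Nat) (l : List String) (comp : List Char), l.length ≤ n →
      pvRecA s l comp = if s.take comp.length = comp then pvLoopB s l comp.length else none := by
  intro n
  induction n with
  | zero =>
    intro l comp hl
    have hl0 : l = [] := List.eq_nil_of_length_eq_zero (Nat.le_zero.mp hl)
    subst hl0
    by_cases hcs : comp = s
    · subst hcs
      rw [pvRecA, if_pos rfl, if_pos (List.take_length), pvLoopB, if_pos rfl]
    · rw [pvRecA, if_neg hcs]
      by_cases hpre : s.take comp.length = comp
      · have hne : comp.length ≠ s.length := by
          intro h
          have h2 := hpre
          rw [h, List.take_length] at h2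
          exact hcs h2.symm
        rw [if_pos hpre, pvLoopB, if_neg hne]
        rfl
      · rw [if_neg hpre]
        rfl
  | succ n ih =>
    intro l comp hl
    by_cases hcs : comp = s
    · subst hcs
      rw [pvRecA, if_pos rfl, if_pos (List.take_length), pvLoopB, if_pos rfl]
    · rw [pvRecA, if_neg hcs]
      by_cases hpre : s.take comp.length = comp
      · have hne : comp.length ≠ s.length := by
          intro h
          have h2 := hpre
          rw [h, List.take_length] at h2
          exact hcs h2.symm
        rw [if_pos hpre, pvLoopB, if_neg hne]
        rcases pv_scan_rel s comp hpre l with ⟨hfa, hfb⟩ | ⟨i, l', hfa, hfb, hrm, htk⟩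
        · rw [hfa, hfb]
        · rw [hfa, hfb]
          show (match h2 : PySem.List.remove? l i with
                | none => none
                | some l' => pvRecA s l' (comp ++ i.toList)) =
              pvLoopB s l' (comp.length + i.toList.length)
          split
          · next h2 => rw [hrm] at h2; exact (Option.some_ne_none _ h2).elim
          · next l'' h2 =>
            rw [hrm] at h2
            injection h2 with h2
            subst h2
            have hl' : l'.length ≤ n := by
              have := pv_remove_length hrm
              omega
            rw [ih l' (comp ++ i.toList) hl']
            have hpre' : s.take (comp ++ i.toList).length = comp ++ i.toList := by
              rw [List.length_append, List.take_add, hpre, htk]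
            rw [if_pos hpre', List.length_append]
      · rw [if_neg hpre, pv_findA_none s comp hpre l]

-- ===== VERDICT (by name: the statement is the Claim_ definition above) =====
theorem spelling_test_helper_spec : Claim_equal_spelling_test_helper := by
  intro s l compare _
  unfold Spec_spelling_test_helper spelling_test_helper spelling_test_helper_alt
  rw [pv_main s.toList l.length l compare.toList (le_refl _), pv_sliceA]
  by_cases h : s.toList.take compare.toList.length = compare.toList
  · rw [if_pos h, if_neg (not_not_intro h)]
  · rw [if_neg h, if_pos h]
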